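-- pv_equiv track=rewrite | github.com/anjakovacevic/uni | sausau/zadzavezbu1.py | prvi
-- ===== SOURCE A (Python) =====
-- def prvi(niz):
--     trenutni = niz[0]
--     if trenutni !=0:
--         return 0
--
--     for elem in niz[1:]:
--         if elem == trenutni + 1:
--             trenutni = elem
--         else:
--             return trenutni + 1
--
--     return trenutni+1
-- ===== SOURCE B (Python) =====
-- def prvi(niz):
--     # Divide and conquer: f(arr, base) = first relative index i with arr[i] != base + i,
--     # or len(arr) if no such index. Answer is f(niz, 0).
--     def f(arr, base):
--         n = len(arr)
--         if n == 0:
--             return 0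
--         if n == 1:
--             return 1 if arr[0] == base else 0
--         mid = n // 2
--         left = f(arr[:mid], base)
--         if left < mid:
--             return left
--         return mid + f(arr[mid:], base + mid)
--     return f(niz, 0)
-- ===== Notes on version B (the rewrite author's own statement) =====
-- stated objective: alternative
-- what changed: A does one left-to-right scan threading an accumulator that tracks the previous element; B is a divide-and-conquer recursion that halves the list, solves the first-mismatch-against-base problem on each half, and combines (left result if the left half has a mismatch, else mid plus the right result).
-- crash fix: On the empty list A raises IndexError (niz[0]); B returns 0. — e.g. on prvi([]): A raises IndexError, B returns 0
import Mathlib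
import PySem

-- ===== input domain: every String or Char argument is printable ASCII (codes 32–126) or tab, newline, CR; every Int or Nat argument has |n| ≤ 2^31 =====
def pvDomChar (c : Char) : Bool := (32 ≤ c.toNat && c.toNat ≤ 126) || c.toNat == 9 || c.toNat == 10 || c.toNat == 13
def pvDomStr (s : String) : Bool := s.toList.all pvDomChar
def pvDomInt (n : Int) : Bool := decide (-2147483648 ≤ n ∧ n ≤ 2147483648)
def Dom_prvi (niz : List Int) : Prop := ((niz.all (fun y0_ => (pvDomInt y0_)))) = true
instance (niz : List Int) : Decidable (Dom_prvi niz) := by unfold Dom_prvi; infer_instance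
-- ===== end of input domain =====

-- B replaces A's accumulator scan with a divide-and-conquer recursion (halve, solve, combine);
-- same answer, genuinely different control structure (objective: alternative). On the empty list
-- A raises IndexError while B returns 0 (see Raises_prvi); Pre_ excludes it.


-- ===== PORT A =====
-- the 'for elem in niz[1:]' loop with the threaded accumulator 'trenutni'
def prviLoopA : List Int → Int → Int
  | [], trenutni => trenutni + 1
  | elem :: rest, trenutni =>
      if elem = trenutni + 1 then prviLoopA rest elem else trenutni + 1

def prvi (niz : List Int) : Int :=
  match niz with
  | [] => 0            -- niz[0] raises IndexError in Python; excluded by Pre_prvi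
  | trenutni :: rest => if trenutni ≠ 0 then 0 else prviLoopA rest trenutni

-- ===== PORT B =====
-- divide and conquer (Source B's f): first relative index i with arr[i] ≠ base + i, else len(arr).
-- fuel = initial length is a pure totality device (each recursive call halves the list, so it
-- never runs out); lengths are Nat, so Lean's / on Nat is exactly Python's // here.
def prviDCF : Nat → List Int → Int → Int
  | _, [], _ => 0
  | _, [x], base => if x = base then 1 else 0
  | 0, _ :: _ :: _, _ => 0            -- unreachable with fuel = length
  | fuel + 1, x :: y :: rest, base =>
      let arr := x :: y :: rest
      let mid := arr.length / 2
      let left := prviDCF fuel (arr.take mid) base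
      if left < (mid : Int) then left
      else (mid : Int) + prviDCF fuel (arr.drop mid) (base + (mid : Int))

def prvi_alt (niz : List Int) : Int := prviDCF niz.length niz 0

-- ===== PRECONDITION & SPEC =====
-- Pre_ excludes the empty list, on which A raises IndexError.
def Pre_prvi (niz : List Int) : Prop := niz ≠ []
instance (niz : List Int) : Decidable (Pre_prvi niz) := by unfold Pre_prvi; infer_instance
def pvWitness_prvi : List Int := [0, 1, 5]

-- On the empty list A raises IndexError (niz[0]); B returns 0.
def Raises_prvi (niz : List Int) : Prop := niz = []
instance (niz : List Int) : Decidable (Raises_prvi niz) := by unfold Raises_prvi; infer_instance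
def pvRaiseWitness_prvi : List Int := []
def pvRaiseWitnessOut_prvi : Int := 0

def Spec_prvi (niz : List Int) (out : Int) : Prop := out = prvi_alt niz
instance (niz : List Int) (out : Int) : Decidable (Spec_prvi niz out) := by unfold Spec_prvi; infer_instance

-- ===== CLAIM (what is proved, stated in full; the proofs are below) =====
def Claim_equal_prvi : Prop := ∀ (niz : List Int), Dom_prvi niz → Pre_prvi niz → Spec_prvi niz (prvi niz)
def Claim_raises_prvi : Prop := (∀ (niz : List Int), Dom_prvi niz → Raises_prvi niz → ¬ Pre_prvi niz) ∧ (Dom_prvi (pvRaiseWitness_prvi) ∧ Raises_prvi (pvRaiseWitness_prvi) ∧ prvi_alt (pvRaiseWitness_prvi) = pvRaiseWitnessOut_prvi)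

-- ===== LEMMAS AND PROOFS =====
-- linear characterisation of the first mismatch against base, base+1, …
def fm : List Int → Int → Int
  | [], _ => 0
  | x :: r, base => if x = base then 1 + fm r (base + 1) else 0

theorem fm_nonneg (a : List Int) (base : Int) : 0 ≤ fm a base := by
  induction a generalizing base with
  | nil => simp [fm]
  | cons x r ih =>
    simp only [fm]
    split_ifs with h
    · have := ih (base + 1); omega
    · omega

theorem fm_le (a : List Int) (base : Int) : fm a base ≤ a.length := by
  induction a generalizing base with
  | nil => simp [fm]
  | cons x r ih =>
    simp only [fm, List.length_cons]
    split_ifs with h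
    · have := ih (base + 1); push_cast; omega
    · push_cast; omega

theorem fm_append (a b : List Int) (base : Int) :
    fm (a ++ b) base =
      if fm a base < a.length then fm a base
      else (a.length : Int) + fm b (base + a.length) := by
  induction a generalizing base with
  | nil => simp [fm]
  | cons x r ih =>
    by_cases h : x = base
    · simp only [List.cons_append, fm, if_pos h, List.length_cons, ih (base + 1)]
      have hle := fm_le r (base + 1)
      have hnn := fm_nonneg r (base + 1)
      by_cases hc : fm r (base + 1) < (r.length : Int)
      · rw [if_pos hc, if_pos (show 1 + fm r (base + 1) < ((r.length + 1 : Nat) : Int) by push_cast; omega)]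
      · rw [if_neg hc, if_neg (show ¬(1 + fm r (base + 1) < ((r.length + 1 : Nat) : Int)) by push_cast; omega)]
        have harg : base + 1 + (r.length : Int) = base + ((r.length : Nat) + 1 : Nat) := by push_cast; ring
        rw [harg]; push_cast; ring
    · simp only [List.cons_append, fm, if_neg h, List.length_cons]
      rw [if_pos (show (0 : Int) < ((r.length + 1 : Nat) : Int) by push_cast; omega)]

theorem prviDCF_eq_fm : ∀ (fuel : Nat) (arr : List Int), arr.length ≤ fuel + 1 →
    ∀ base, prviDCF fuel arr base = fm arr base := by
  intro fuel
  induction fuel with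
  | zero =>
    intro arr h base
    match arr, h with
    | [], _ => simp [prviDCF, fm]
    | [x], _ => simp [prviDCF, fm]
  | succ fuel ih =>
    intro arr h base
    match arr with
    | [] => simp [prviDCF, fm]
    | [x] => simp [prviDCF, fm]
    | x :: y :: rest =>
      simp only [prviDCF]
      set arr := x :: y :: rest with harr
      have hlen : arr.length = rest.length + 2 := by simp [harr]
      have hmid1 : 1 ≤ arr.length / 2 := by omega
      have hmid2 : arr.length / 2 < arr.length := by omega
      have hmidlen : (arr.take (arr.length / 2)).length = arr.length / 2 := by
        simp [List.length_take]; omega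
      have hfuel : arr.length ≤ fuel + 2 := by simpa using h
      have ht := ih (arr.take (arr.length / 2)) (by rw [hmidlen]; omega) base
      have hd := ih (arr.drop (arr.length / 2)) (by simp [List.length_drop]; omega)
        (base + (arr.length / 2 : Nat))
      have hsplit : arr = arr.take (arr.length / 2) ++ arr.drop (arr.length / 2) :=
        (List.take_append_drop _ _).symm
      conv_rhs => rw [hsplit]
      rw [fm_append, hmidlen, ht, hd]

theorem prviDC_eq_fm (arr : List Int) (base : Int) :
    prviDCF arr.length arr base = fm arr base :=
  prviDCF_eq_fm arr.length arr (Nat.le_succ _) base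

theorem loopA_eq_fm (rest : List Int) (t : Int) : prviLoopA rest t = t + 1 + fm rest (t + 1) := by
  induction rest generalizing t with
  | nil => simp [prviLoopA, fm]
  | cons e r ih =>
    simp only [prviLoopA, fm]
    by_cases h : e = t + 1
    · rw [if_pos h, if_pos h, ih]; rw [h]; ring
    · rw [if_neg h, if_neg h]; ring

-- ===== VERDICT (by name: the statement is the Claim_ definition above) =====
theorem prvi_spec : Claim_equal_prvi := by
  intro niz _ hpre
  unfold Spec_prvi prvi prvi_alt
  match niz with
  | [] => exact absurd rfl hpre
  | x :: rest =>
    rw [prviDC_eq_fm]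
    simp only [fm]
    by_cases hx : x = 0
    · subst hx; simp [loopA_eq_fm]
    · simp [hx]

@[simp] theorem prvi_raises : Claim_raises_prvi := by
  unfold Claim_raises_prvi
  exact ⟨fun niz _ hr hp => hp hr, by decide⟩
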